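-- pv_equiv track=rewrite | github.com/mpettersson/PythonReview | questions/list/find_geometric_progression_k_tuples.py | find_geometric_progression_k_tuples
-- ===== SOURCE A (Python) =====
-- from collections import defaultdict
--
-- def find_geometric_progression_k_tuples(l, r, k=3):
--
--     def _rec(d, k, i, a, result):
--         if len(a) == k:
--             result.append(a[:])
--         else:
--             if l[i] * r in d:
--                 for idx in d[l[i] * r]:
--                     if idx > i:
--                         a.append(idx)
--                         _rec(d, k, idx, a, result)
--                         a.pop()
--
--     if isinstance(l, list) and isinstance(r, int) and isinstance(k, int) and 0 <= k:
--         n = len(l)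
--         d = defaultdict(list)
--         result = []
--         for i, num in enumerate(l):
--             d[num].append(i)
--         for i in range(n):
--             _rec(d, k, i, [i], result)
--         return result
-- ===== SOURCE B (Python) =====
-- def find_geometric_progression_k_tuples(l, r, k=3):
--     if isinstance(l, list) and isinstance(r, int) and isinstance(k, int) and 0 <= k:
--         d = {}
--         for i, num in enumerate(l):
--             d.setdefault(num, []).append(i)
--         if k == 0:
--             return []
--         current = [[i] for i in range(len(l))]
--         for _ in range(k - 1):
--             if not current:
--                 break
--             current = [t + [idx]
--                        for t in current
--                        for idx in d.get(l[t[-1]] * r, [])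
--                        if idx > t[-1]]
--         return current
-- ===== Notes on version B (the rewrite author's own statement) =====
-- stated objective: alternative
-- what changed: The recursive DFS helper (mutating accumulator, one call per start index) is replaced by an iterative breadth-by-length build: start from all singletons and extend every partial tuple k-1 times via the same value-to-indices dict, with an early exit when no partial tuples remain; lexicographic output order is preserved.
import Mathlib
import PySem

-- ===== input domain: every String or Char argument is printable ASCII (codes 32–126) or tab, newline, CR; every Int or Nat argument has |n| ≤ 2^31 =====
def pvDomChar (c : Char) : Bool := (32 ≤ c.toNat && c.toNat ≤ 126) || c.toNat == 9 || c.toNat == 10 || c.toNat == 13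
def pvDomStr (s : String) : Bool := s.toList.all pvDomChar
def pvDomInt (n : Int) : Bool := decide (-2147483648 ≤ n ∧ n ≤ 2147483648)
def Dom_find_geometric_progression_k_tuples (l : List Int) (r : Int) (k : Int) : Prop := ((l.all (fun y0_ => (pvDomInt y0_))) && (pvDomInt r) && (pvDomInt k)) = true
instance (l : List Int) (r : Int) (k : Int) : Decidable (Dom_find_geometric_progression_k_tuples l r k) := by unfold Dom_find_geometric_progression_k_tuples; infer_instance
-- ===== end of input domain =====

-- B replaces A's recursive DFS by an iterative extend-by-one-level loop (same dict, same
-- lexicographic output order); objective: alternative decomposition, same cost.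

-- ===== PORT A =====
-- value -> list of its indices, in order ('for i, num in enumerate(l): d[num].append(i)')
def pvBuildD (l : List Int) : PySem.Dict Int (List Int) :=
  (PySem.List.enumerate l).foldl (fun d p => d.modify p.2 [] (fun v => v ++ [p.1])) PySem.Dict.empty

-- _rec(d, k, i, a, result); `fuel` only makes the same recursion total (indices in the dict are
-- < l.length and strictly increase, so fuel = l.length is never exhausted; exact on every input).
-- l[i] is ported as pyGetD l i 0: i is always an in-range index here, so this is exact.
def pvRecA (l : List Int) (r : Int) (d : PySem.Dict Int (List Int)) (k : Int)
    (fuel : Nat) (i : Int) (a : List Int) (result : List (List Int)) : List (List Int) :=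
  if (a.length : Int) = k then result ++ [a]
  else
    match d.get? ((PySem.List.pyGetD l i 0) * r) with   -- 'if l[i] * r in d: for idx in d[l[i] * r]'
    | none => result
    | some lst =>
      match fuel with
      | 0 => result
      | f + 1 =>
        lst.foldl (fun res idx =>
          if idx > i then pvRecA l r d k f idx (a ++ [idx]) res else res) result

def find_geometric_progression_k_tuples (l : List Int) (r : Int) (k : Int) : Option (List (List Int)) :=
  if 0 ≤ k then
    let n := l.length
    let d := pvBuildD l
    some ((PySem.List.pyRange 0 (n : Int) 1).foldl
      (fun result i => pvRecA l r d k n i [i] result) [])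
  else none   -- the guard fails: Python falls off the function, returning None

-- ===== PORT B =====
-- one comprehension step: [t + [idx] for t in cur for idx in d.get(l[t[-1]]*r, []) if idx > t[-1]]
def pvExt (l : List Int) (r : Int) (d : PySem.Dict Int (List Int))
    (cur : List (List Int)) : List (List Int) :=
  cur.flatMap (fun t =>
    ((d.getD ((PySem.List.pyGetD l (PySem.List.pyGetD t (-1) 0) 0) * r) []).filter
        (fun idx => idx > PySem.List.pyGetD t (-1) 0)).map (fun idx => t ++ [idx]))

-- 'for _ in range(k-1): if not current: break; current = …'
def pvLevels (l : List Int) (r : Int) (d : PySem.Dict Int (List Int)) :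
    Nat → List (List Int) → List (List Int)
  | 0, cur => cur
  | m + 1, cur => if cur = [] then cur else pvLevels l r d m (pvExt l r d cur)

def find_geometric_progression_k_tuples_alt (l : List Int) (r : Int) (k : Int) : Option (List (List Int)) :=
  if 0 ≤ k then
    let d := pvBuildD l
    if k = 0 then some []
    else some (pvLevels l r d (k - 1).toNat
      ((PySem.List.pyRange 0 (l.length : Int) 1).map (fun i => [i])))
  else none

-- ===== PRECONDITION & SPEC =====
def Spec_find_geometric_progression_k_tuples (l : List Int) (r : Int) (k : Int) (out : Option (List (List Int))) : Prop := out = find_geometric_progression_k_tuples_alt l r k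
instance (l : List Int) (r : Int) (k : Int) (out : Option (List (List Int))) : Decidable (Spec_find_geometric_progression_k_tuples l r k out) := by unfold Spec_find_geometric_progression_k_tuples; infer_instance

-- ===== CLAIM (what is proved, stated in full; the proofs are below) =====
def Claim_equal_find_geometric_progression_k_tuples : Prop := ∀ (l : List Int) (r : Int) (k : Int), Dom_find_geometric_progression_k_tuples l r k → Spec_find_geometric_progression_k_tuples l r k (find_geometric_progression_k_tuples l r k)

-- ===== LEMMAS AND PROOFS =====

lemma pvLevels_zero (l : List Int) (r : Int) (d : PySem.Dict Int (List Int)) (cur : List (List Int)) :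
    pvLevels l r d 0 cur = cur := rfl

lemma pvLevels_succ (l : List Int) (r : Int) (d : PySem.Dict Int (List Int)) (m : Nat) (cur : List (List Int)) :
    pvLevels l r d (m + 1) cur = if cur = [] then cur else pvLevels l r d m (pvExt l r d cur) := rfl

-- every index stored in the dict is an in-range index of l
lemma pvMem_enumerate_bound {α : Type} (l : List α) (s : Int) (p : Int × α)
    (h : p ∈ PySem.List.enumerate l s) : s ≤ p.1 ∧ p.1 < s + l.length := by
  induction l generalizing s with
  | nil => simp [PySem.List.enumerate_nil] at h
  | cons x xs ih =>
    rw [PySem.List.enumerate_cons, List.mem_cons] at h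
    rcases h with rfl | h
    · simp only [List.length_cons]; push_cast; omega
    · have := ih (s + 1) h
      simp only [List.length_cons]; push_cast at this ⊢; omega

lemma pvBuildD_mem (l : List Int) (v idx : Int)
    (h : idx ∈ (pvBuildD l).getD v []) : 0 ≤ idx ∧ idx < (l.length : Int) := by
  have hrw : pvBuildD l
      = ((PySem.List.enumerate l).map Prod.swap).foldl
          (fun d p => d.modify p.1 [] (fun w => w ++ [p.2])) PySem.Dict.empty := by
    rw [List.foldl_map]; rfl
  rw [hrw, PySem.Dict.getD_foldl_modify_append] at h
  simp only [PySem.Dict.getD_empty, List.nil_append, List.mem_map, List.mem_filter,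
    List.mem_map] at h
  obtain ⟨p, ⟨⟨q, hq, rfl⟩, _⟩, rfl⟩ := h
  have h2 := pvMem_enumerate_bound l 0 q hq
  have hsw : (Prod.swap q).2 = q.1 := rfl
  rw [hsw]
  omega

-- last element of a snoc, as Python's t[-1]
lemma pvLast_snoc (a : List Int) (x : Int) :
    PySem.List.pyGetD (a ++ [x]) (-1) 0 = x := by
  simp [PySem.List.pyGetD, PySem.List.pyGet?, PySem.List.pyIdx?]

-- generic accumulator shapes
lemma pvFoldl_const {α β : Type} (step : β → α → β) (lst : List α) (res : β)
    (h : ∀ x ∈ lst, ∀ res, step res x = res) : lst.foldl step res = res := by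
  induction lst generalizing res with
  | nil => rfl
  | cons x xs ih =>
    simp only [List.foldl_cons, h x (by simp)]
    exact ih res (fun y hy => h y (by simp [hy]))

lemma pvFoldl_acc {α : Type} (g : α → List (List Int)) (lst : List α) (res : List (List Int)) :
    lst.foldl (fun res x => res ++ g x) res = res ++ lst.flatMap g := by
  induction lst generalizing res with
  | nil => simp
  | cons x xs ih => simp [ih, List.flatMap_cons]

lemma pvFlatMap_if (c : Int → Prop) [DecidablePred c] (g : Int → List (List Int)) (lst : List Int) :
    lst.flatMap (fun x => if c x then g x else [])
      = (lst.filter (fun x => decide (c x))).flatMap g := by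
  induction lst with
  | nil => rfl
  | cons x xs ih => by_cases h : c x <;> simp [List.flatMap_cons, h, ih]

-- result accumulates: pvRecA appends its output to `result`
lemma pvRecA_acc (l : List Int) (r : Int) (d : PySem.Dict Int (List Int)) (k : Int) :
    ∀ (fuel : Nat) (i : Int) (a : List Int) (res : List (List Int)),
      pvRecA l r d k fuel i a res = res ++ pvRecA l r d k fuel i a [] := by
  intro fuel
  induction fuel with
  | zero =>
    intro i a res
    rw [pvRecA]
    conv_rhs => rw [pvRecA]
    by_cases hl : (a.length : Int) = k
    · simp only [if_pos hl, List.nil_append]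
    · simp only [if_neg hl]
      cases h : d.get? ((PySem.List.pyGetD l i 0) * r) <;> simp
  | succ f ih =>
    intro i a res
    rw [pvRecA]
    conv_rhs => rw [pvRecA]
    by_cases hl : (a.length : Int) = k
    · simp only [if_pos hl, List.nil_append]
    · simp only [if_neg hl]
      cases h : d.get? ((PySem.List.pyGetD l i 0) * r) with
      | none => simp
      | some lst =>
        have hstep : ∀ (res : List (List Int)) (idx : Int),
            (if idx > i then pvRecA l r d k f idx (a ++ [idx]) res else res)
              = res ++ (if idx > i then pvRecA l r d k f idx (a ++ [idx]) [] else []) := by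
          intro res idx
          by_cases hc : idx > i
          · rw [if_pos hc, if_pos hc]
            exact ih idx (a ++ [idx]) res
          · simp [hc]
        calc lst.foldl (fun res idx => if idx > i then pvRecA l r d k f idx (a ++ [idx]) res else res) res
            = lst.foldl (fun res idx => res ++ (if idx > i then pvRecA l r d k f idx (a ++ [idx]) [] else [])) res := by
              congr 1; funext res idx; exact hstep res idx
          _ = res ++ lst.flatMap (fun idx => if idx > i then pvRecA l r d k f idx (a ++ [idx]) [] else []) := pvFoldl_acc _ _ _
          _ = res ++ ([] ++ lst.flatMap (fun idx => if idx > i then pvRecA l r d k f idx (a ++ [idx]) [] else [])) := by simp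
          _ = res ++ lst.foldl (fun res idx => res ++ (if idx > i then pvRecA l r d k f idx (a ++ [idx]) [] else [])) [] := by rw [pvFoldl_acc]
          _ = res ++ lst.foldl (fun res idx => if idx > i then pvRecA l r d k f idx (a ++ [idx]) res else res) [] := by
              congr 1; congr 1; funext res idx; exact (hstep res idx).symm

-- pvLevels on the empty list is empty, and it distributes over append
lemma pvLevels_nil (l : List Int) (r : Int) (d : PySem.Dict Int (List Int)) (m : Nat) :
    pvLevels l r d m [] = [] := by
  cases m with
  | zero => rfl
  | succ m => rw [pvLevels_succ]; simp

lemma pvLevels_append (l : List Int) (r : Int) (d : PySem.Dict Int (List Int)) :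
    ∀ (m : Nat) (xs ys : List (List Int)),
      pvLevels l r d m (xs ++ ys) = pvLevels l r d m xs ++ pvLevels l r d m ys := by
  intro m
  induction m with
  | zero => intro xs ys; rfl
  | succ m ih =>
    intro xs ys
    rcases hx : xs with _ | ⟨x, xs'⟩
    · simp [pvLevels_nil]
    · rcases hy : ys with _ | ⟨y, ys'⟩
      · simp [pvLevels_nil]
      · rw [pvLevels_succ, pvLevels_succ, pvLevels_succ]
        simp only [if_neg (by simp : (x :: xs') ++ (y :: ys') ≠ ([] : List (List Int))),
          if_neg (by simp : (x :: xs') ≠ ([] : List (List Int))),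
          if_neg (by simp : (y :: ys') ≠ ([] : List (List Int)))]
        rw [show pvExt l r d ((x :: xs') ++ (y :: ys'))
              = pvExt l r d (x :: xs') ++ pvExt l r d (y :: ys') by
            simp [pvExt, List.flatMap_append]]
        exact ih _ _

lemma pvLevels_flatMap (l : List Int) (r : Int) (d : PySem.Dict Int (List Int))
    (m : Nat) (xs : List (List Int)) :
    pvLevels l r d m xs = xs.flatMap (fun t => pvLevels l r d m [t]) := by
  induction xs with
  | nil => simp [pvLevels_nil]
  | cons x xs ih =>
    rw [show (x :: xs : List (List Int)) = [x] ++ xs from rfl, pvLevels_append, ih]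
    simp

-- k = 0 (more generally a.length > k): the DFS never records anything
lemma pvRecA_long (l : List Int) (r : Int) (d : PySem.Dict Int (List Int)) (k : Int) :
    ∀ (fuel : Nat) (i : Int) (a : List Int) (res : List (List Int)),
      k < (a.length : Int) → pvRecA l r d k fuel i a res = res := by
  intro fuel
  induction fuel with
  | zero =>
    intro i a res h
    rw [pvRecA]
    rw [if_neg (by omega : ¬ ((a.length : Int) = k))]
    cases d.get? ((PySem.List.pyGetD l i 0) * r) <;> rfl
  | succ f ih =>
    intro i a res h
    rw [pvRecA]
    rw [if_neg (by omega : ¬ ((a.length : Int) = k))]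
    cases d.get? ((PySem.List.pyGetD l i 0) * r) with
    | none => rfl
    | some lst =>
      refine pvFoldl_const _ lst res (fun idx _ res => ?_)
      by_cases hc : idx > i
      · rw [if_pos hc]
        exact ih idx (a ++ [idx]) res (by simp; omega)
      · simp [hc]

-- MAIN: one DFS call from a partial tuple a (with last index i) equals extending [a] level by level
lemma pvRecA_eq_levels (l : List Int) (r k : Int) :
    ∀ (fuel : Nat) (i : Int) (a : List Int),
      0 ≤ i → i < (l.length : Int) → (l.length : Int) ≤ (fuel : Int) + 1 + i →
      PySem.List.pyGetD a (-1) 0 = i → (a.length : Int) ≤ k →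
      pvRecA l r (pvBuildD l) k fuel i a []
        = pvLevels l r (pvBuildD l) (k - (a.length : Int)).toNat [a] := by
  intro fuel
  induction fuel with
  | zero =>
    intro i a h0 hn hf hlast hlen
    by_cases heq : (a.length : Int) = k
    · rw [pvRecA, if_pos heq, show (k - (a.length : Int)).toNat = 0 by omega, pvLevels_zero]
      rfl
    · -- fuel 0 forces i = l.length - 1: no index idx > i exists in the dict, both sides are []
      obtain ⟨m, hm⟩ : ∃ m, (k - (a.length : Int)).toNat = m + 1 :=
        ⟨(k - (a.length : Int)).toNat - 1, by omega⟩
      have hext : pvExt l r (pvBuildD l) [a] = [] := by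
        simp only [pvExt, List.flatMap_cons, List.flatMap_nil, List.append_nil, hlast]
        rw [List.filter_eq_nil_iff.mpr, List.map_nil]
        intro idx hidx
        have := pvBuildD_mem l _ idx hidx
        simp
        omega
      rw [hm, pvLevels_succ, if_neg (by simp : ([a] : List (List Int)) ≠ []), hext, pvLevels_nil]
      rw [pvRecA, if_neg heq]
      cases (pvBuildD l).get? ((PySem.List.pyGetD l i 0) * r) <;> rfl
  | succ f ih =>
    intro i a h0 hn hf hlast hlen
    by_cases heq : (a.length : Int) = k
    · rw [pvRecA, if_pos heq, show (k - (a.length : Int)).toNat = 0 by omega, pvLevels_zero]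
      rfl
    · obtain ⟨m, hm⟩ : ∃ m, (k - (a.length : Int)).toNat = m + 1 :=
        ⟨(k - (a.length : Int)).toNat - 1, by omega⟩
      -- B side shape
      have hB : pvLevels l r (pvBuildD l) (m + 1) [a]
          = (((pvBuildD l).getD ((PySem.List.pyGetD l i 0) * r) []).filter
                (fun idx => idx > i)).flatMap
              (fun idx => pvLevels l r (pvBuildD l) m [a ++ [idx]]) := by
        rw [pvLevels_succ, if_neg (by simp : ([a] : List (List Int)) ≠ [])]
        rw [pvLevels_flatMap]
        simp [pvExt, hlast, List.flatMap_map]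
      rw [hm, hB]
      -- A side
      cases hg : (pvBuildD l).get? ((PySem.List.pyGetD l i 0) * r) with
      | none =>
        have hgetD : (pvBuildD l).getD ((PySem.List.pyGetD l i 0) * r) [] = [] := by
          rw [PySem.Dict.getD_eq_get?_getD, hg]; rfl
        have hL : pvRecA l r (pvBuildD l) k (f + 1) i a [] = [] := by
          rw [pvRecA, if_neg heq, hg]
        rw [hL, hgetD]
        simp
      | some lst =>
        have hgetD : (pvBuildD l).getD ((PySem.List.pyGetD l i 0) * r) [] = lst := by
          rw [PySem.Dict.getD_eq_get?_getD, hg]; rfl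
        have hL : pvRecA l r (pvBuildD l) k (f + 1) i a []
            = lst.foldl (fun res idx =>
                if idx > i then pvRecA l r (pvBuildD l) k f idx (a ++ [idx]) res else res) [] := by
          rw [pvRecA, if_neg heq, hg]
        rw [hL, hgetD]
        have hfold : lst.foldl (fun res idx =>
              if idx > i then pvRecA l r (pvBuildD l) k f idx (a ++ [idx]) res else res) []
            = lst.flatMap (fun idx =>
                if idx > i then pvRecA l r (pvBuildD l) k f idx (a ++ [idx]) [] else []) := by
          have hacc := pvFoldl_acc (fun idx =>
            if idx > i then pvRecA l r (pvBuildD l) k f idx (a ++ [idx]) [] else []) lst []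
          rw [← List.nil_append (lst.flatMap _), ← hacc]
          congr 1; funext res idx
          by_cases hc : idx > i
          · simp [hc, ← pvRecA_acc]
          · simp [hc]
        rw [hfold, pvFlatMap_if (fun idx => idx > i)]
        apply List.flatMap_congr
        intro idx hidx
        have hmemd : idx ∈ (pvBuildD l).getD ((PySem.List.pyGetD l i 0) * r) [] := by
          rw [hgetD]
          exact List.mem_of_mem_filter hidx
        have hbnd := pvBuildD_mem l _ idx hmemd
        have hgt : idx > i := by
          have := List.of_mem_filter hidx
          simpa using this
        rw [ih idx (a ++ [idx]) (by omega) hbnd.2 (by omega)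
          (pvLast_snoc a idx) (by simp; omega)]
        congr 1
        simp
        omega

-- ===== VERDICT (by name: the statement is the Claim_ definition above) =====
theorem find_geometric_progression_k_tuples_spec : Claim_equal_find_geometric_progression_k_tuples := by
  intro l r k _
  unfold Spec_find_geometric_progression_k_tuples
  unfold find_geometric_progression_k_tuples find_geometric_progression_k_tuples_alt
  by_cases hk : 0 ≤ k
  · simp only [if_pos hk]
    by_cases hk0 : k = 0
    · -- k = 0: every DFS call records nothing
      subst hk0
      congr 1
      refine pvFoldl_const _ _ [] (fun i _ res => ?_)
      exact pvRecA_long l r (pvBuildD l) 0 l.length i [i] res (by simp)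
    · simp only [if_neg hk0]
      congr 1
      have hstep : ∀ (res : List (List Int)) (i : Int),
          pvRecA l r (pvBuildD l) k l.length i [i] res
            = res ++ pvRecA l r (pvBuildD l) k l.length i [i] [] := fun res i =>
        pvRecA_acc l r (pvBuildD l) k l.length i [i] res
      calc (PySem.List.pyRange 0 (l.length : Int) 1).foldl
              (fun result i => pvRecA l r (pvBuildD l) k l.length i [i] result) []
          = (PySem.List.pyRange 0 (l.length : Int) 1).foldl
              (fun result i => result ++ pvRecA l r (pvBuildD l) k l.length i [i] []) [] := by
            congr 1; funext res i; exact hstep res i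
        _ = (PySem.List.pyRange 0 (l.length : Int) 1).flatMap
              (fun i => pvRecA l r (pvBuildD l) k l.length i [i] []) := by
            rw [pvFoldl_acc]; simp
        _ = (PySem.List.pyRange 0 (l.length : Int) 1).flatMap
              (fun i => pvLevels l r (pvBuildD l) (k - 1).toNat [[i]]) := by
            apply List.flatMap_congr
            intro i hi
            have hmem := (PySem.List.mem_pyRange_one).mp hi
            have hlast : PySem.List.pyGetD [i] (-1) 0 = i := pvLast_snoc [] i
            rw [pvRecA_eq_levels l r k l.length i [i] hmem.1 hmem.2 (by omega) hlast
              (by simp; omega)]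
            norm_num
        _ = pvLevels l r (pvBuildD l) (k - 1).toNat
              ((PySem.List.pyRange 0 (l.length : Int) 1).map (fun i => [i])) := by
            rw [pvLevels_flatMap, List.flatMap_map]
  · simp [if_neg hk]
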